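-- pv_equiv track=rewrite | github.com/chandra-mta/Space_Weather_New | ACIS_Rad/Scripts/create_config_plot.py | find_fmt_region
-- ===== SOURCE A (Python) =====
-- def find_fmt_region(start, stop, fmt, time):
--     """
--     find fmt changing periods
--     input:  start   --- starting time in sec from 1998.1.1
--             sopt    --- stopping time in sec from 1998.1.1
--             fmt     --- a list of fmt values
--             time    --- a list of time coresponding to fmt list
--     output: [start_set, stop_set]
--             start_set = [fmt1_start, fmt2_start, fmt3_start, fmt4_start, fmt5_start]
--             stop_set  = [fmt1_stop,  fmt2_stop,  fmt3_stop,  fmt4_stop,  fmt5_stop]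
--     """
-- #
-- #--- create dictioinary with fmt names
-- #
--     s_start = {}
--     s_stop  = {}
--     for fval in ['fmt1', 'fmt2','fmt3','fmt4','fmt5','fmt6','fmt7','fmt8']:
--         s_start[fval] = []
--         s_stop[fval]  = []
--
--     flen = len(fmt)
-- #
-- #--- start reading fmt; if fmt is same as one before, skip
-- #
--     prev = fmt[0].lower()
--     s_start[prev] = [time[0]]
--
--     for k in range(1, flen):
--         fval = fmt[k].lower()
--         if fval == prev:
--             continue
--         else:
--             s_stop  = update_dict_ent(s_stop,  prev, time[k])
--             s_start = update_dict_ent(s_start, fval, time[k])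
--             prev    = fval
-- #
-- #--- closet the last entry
-- #
--     flast  = fmt[flen-1].lower()
--     ftime  = time[flen-1]
--     s_stop = update_dict_ent(s_stop, flast, ftime)
-- #
-- #--- since fmt3 , fmt4, fmt5 don't happen often and rather quick, expand the "line" width
-- #--- so that we can see on the plot
-- #
--     for fval in ['fmt3','fmt4','fmt5']:
--         for k in range(0, len(s_stop[fval])):
--             s_stop[fval][k] += 1000
--
--     start_set = [s_start['fmt1'], s_start['fmt2'], s_start['fmt3'], s_start['fmt4'], s_start['fmt5']]
--     stop_set  = [s_stop['fmt1'],  s_stop['fmt2'],  s_stop['fmt3'],  s_stop['fmt4'],  s_stop['fmt5']]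
--
--     return [start_set, stop_set]
--
-- def update_dict_ent(cdict, key, val):
--
--     try:
--         out = cdict[key]
--         out.append(val)
--         cdict[key] = out
--     except:
--         cdict[key] = [val]
--
--     return cdict
-- ===== SOURCE B (Python) =====
-- def find_fmt_region(start, stop, fmt, time):
--     low = [f.lower() for f in fmt]
--     tlast = time[len(low) - 1]
--     runs = []
--     cur, cur_start = low[0], time[0]
--     for f, t in zip(low[1:], time[1:]):
--         if f != cur:
--             runs.append((cur, cur_start, t))
--             cur, cur_start = f, t
--     runs.append((cur, cur_start, tlast))
--     keys = ('fmt1', 'fmt2', 'fmt3', 'fmt4', 'fmt5')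
--     pad = lambda f: 1000 if f in ('fmt3', 'fmt4', 'fmt5') else 0
--     start_set = [[s for key, s, _ in runs if key == f] for f in keys]
--     stop_set = [[e + pad(f) for key, _, e in runs if key == f] for f in keys]
--     return [start_set, stop_set]
-- ===== Notes on version B (the rewrite author's own statement) =====
-- stated objective: simpler
-- what changed: B builds one list of contiguous (key, start, stop) runs in a single pass and derives the five per-format start/stop lists by filtering it (with the +1000 pad applied in the comprehension), instead of A's two fmt-keyed dicts updated via try/except append-or-create plus a separate in-place +1000 mutation pass over fmt3..fmt5.
import Mathlib
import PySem

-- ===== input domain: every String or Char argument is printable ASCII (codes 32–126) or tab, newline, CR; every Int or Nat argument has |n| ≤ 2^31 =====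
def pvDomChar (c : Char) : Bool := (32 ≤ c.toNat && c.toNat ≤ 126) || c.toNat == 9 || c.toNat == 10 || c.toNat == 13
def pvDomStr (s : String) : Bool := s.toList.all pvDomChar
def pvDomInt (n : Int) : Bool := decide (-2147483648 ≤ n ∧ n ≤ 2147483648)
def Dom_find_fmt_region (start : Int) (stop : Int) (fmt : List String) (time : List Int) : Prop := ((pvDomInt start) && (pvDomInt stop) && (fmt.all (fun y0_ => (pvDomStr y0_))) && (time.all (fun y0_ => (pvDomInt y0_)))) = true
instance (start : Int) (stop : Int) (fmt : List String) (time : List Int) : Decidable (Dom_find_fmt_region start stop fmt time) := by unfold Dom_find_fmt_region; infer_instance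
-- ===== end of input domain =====

-- B replaces A's pair of fmt-keyed dicts (append-or-create per change point, then an in-place
-- +1000 mutation pass over fmt3..fmt5) by one run list (key, start, stop) built in a single pass,
-- from which the five per-format lists are obtained by filtering; objective: simpler decomposition.

-- ===== PORT A =====
def update_dict_ent (cdict : PySem.Dict String (List Int)) (key : String) (val : Int) :
    PySem.Dict String (List Int) :=
  match cdict.get? key with          -- try: cdict[key] (KeyError caught below)
  | some out => cdict.insert key (out ++ [val])
  | none     => cdict.insert key [val]

def find_fmt_region (start : Int) (stop : Int) (fmt : List String) (time : List Int) :
    List (List (List Int)) :=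
  -- one loop fills both dicts with []
  let init :=
    (["fmt1","fmt2","fmt3","fmt4","fmt5","fmt6","fmt7","fmt8"]).foldl
      (fun (d : PySem.Dict String (List Int) × PySem.Dict String (List Int)) fval =>
        (d.1.insert fval [], d.2.insert fval []))
      (PySem.Dict.empty, PySem.Dict.empty)
  let s_start := init.1
  let s_stop := init.2
  let flen : Int := fmt.length
  -- fmt[0] / time[0] raise IndexError on empty input: excluded by Pre_ (pyGetD default unreachable there)
  let prev := PySem.Str.lower (PySem.List.pyGetD fmt 0 "")
  let s_start := s_start.insert prev [PySem.List.pyGetD time 0 0]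
  let st :=
    (PySem.List.pyRange 1 flen 1).foldl
      (fun (st : PySem.Dict String (List Int) × PySem.Dict String (List Int) × String) k =>
        let fval := PySem.Str.lower (PySem.List.pyGetD fmt k "")
        if fval == st.2.2 then st    -- continue
        else
          let s_stop2 := update_dict_ent st.2.1 st.2.2 (PySem.List.pyGetD time k 0)
          let s_start2 := update_dict_ent st.1 fval (PySem.List.pyGetD time k 0)
          (s_start2, s_stop2, fval))
      (s_start, s_stop, prev)
  let s_start := st.1
  let flast := PySem.Str.lower (PySem.List.pyGetD fmt (flen - 1) "")
  let ftime := PySem.List.pyGetD time (flen - 1) 0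
  let s_stop := update_dict_ent st.2.1 flast ftime
  -- 'for k in range(0, len(s_stop[fval])): s_stop[fval][k] += 1000' mutates the stored list in
  -- place; the pure rendering re-inserts the updated list under the same key
  let s_stop :=
    (["fmt3","fmt4","fmt5"]).foldl
      (fun (d : PySem.Dict String (List Int)) fval =>
        let l := d.getD fval []
        let l := (PySem.List.pyRange 0 (l.length : Int) 1).foldl
          (fun (m : List Int) k => m.set k.toNat (PySem.List.pyGetD m k 0 + 1000)) l
        d.insert fval l)
      s_stop
  [[s_start.getD "fmt1" [], s_start.getD "fmt2" [], s_start.getD "fmt3" [],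
    s_start.getD "fmt4" [], s_start.getD "fmt5" []],
   [s_stop.getD "fmt1" [], s_stop.getD "fmt2" [], s_stop.getD "fmt3" [],
    s_stop.getD "fmt4" [], s_stop.getD "fmt5" []]]

-- ===== PORT B =====
def find_fmt_region_alt (start : Int) (stop : Int) (fmt : List String) (time : List Int) :
    List (List (List Int)) :=
  let low := fmt.map PySem.Str.lower
  let tlast := PySem.List.pyGetD time ((low.length : Int) - 1) 0
  let st :=
    ((PySem.List.slice low (some 1) none).zip (PySem.List.slice time (some 1) none)).foldl
      (fun (st : List (String × Int × Int) × String × Int) p =>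
        if p.1 != st.2.1 then (st.1 ++ [(st.2.1, st.2.2, p.2)], p.1, p.2) else st)
      ([], PySem.List.pyGetD low 0 "", PySem.List.pyGetD time 0 0)
  let runs := st.1 ++ [(st.2.1, st.2.2, tlast)]
  let keys := ["fmt1","fmt2","fmt3","fmt4","fmt5"]
  let pad := fun (f : String) => if f == "fmt3" || f == "fmt4" || f == "fmt5" then (1000 : Int) else 0
  [keys.map (fun f => ((runs.filter (fun r => r.1 == f)).map (fun r => r.2.1))),
   keys.map (fun f => ((runs.filter (fun r => r.1 == f)).map (fun r => r.2.2 + pad f)))]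

-- ===== PRECONDITION & SPEC =====
-- Pre_ excludes exactly the inputs where A raises IndexError: empty fmt (fmt[0]) or a time list
-- shorter than fmt (time[len(fmt)-1]).
def Pre_find_fmt_region (start : Int) (stop : Int) (fmt : List String) (time : List Int) : Prop :=
  fmt ≠ [] ∧ fmt.length ≤ time.length
instance (start : Int) (stop : Int) (fmt : List String) (time : List Int) :
    Decidable (Pre_find_fmt_region start stop fmt time) := by
  unfold Pre_find_fmt_region; infer_instance

def pvWitness_find_fmt_region : Int × Int × List String × List Int :=
  (0, 0, ["FMT1", "fmt3", "fmt3", "fmt2"], [10, 20, 30, 40])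

def Spec_find_fmt_region (start : Int) (stop : Int) (fmt : List String) (time : List Int)
    (out : List (List (List Int))) : Prop := out = find_fmt_region_alt start stop fmt time
instance (start : Int) (stop : Int) (fmt : List String) (time : List Int)
    (out : List (List (List Int))) : Decidable (Spec_find_fmt_region start stop fmt time out) := by
  unfold Spec_find_fmt_region; infer_instance

-- ===== CLAIM (what is proved, stated in full; the proofs are below) =====
def Claim_equal_find_fmt_region : Prop :=
  ∀ (start : Int) (stop : Int) (fmt : List String) (time : List Int),
    Dom_find_fmt_region start stop fmt time → Pre_find_fmt_region start stop fmt time →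
      Spec_find_fmt_region start stop fmt time (find_fmt_region start stop fmt time)

-- ===== LEMMAS AND PROOFS =====

-- the run decomposition both programs compute: pairs are the raw (fmt, time) pairs after the
-- first one; cur/cs the current run's lowered key and start time; tl the closing stop time
def goRuns (tl : Int) : String → Int → List (String × Int) → List (String × Int × Int)
  | cur, cs, [] => [(cur, cs, tl)]
  | cur, cs, p :: rest =>
      if PySem.Str.lower p.1 == cur then goRuns tl cur cs rest
      else (cur, cs, p.2) :: goRuns tl (PySem.Str.lower p.1) p.2 rest

def startsFor (key : String) (runs : List (String × Int × Int)) : List Int :=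
  (runs.filter (fun r => r.1 == key)).map (fun r => r.2.1)

def stopsFor (key : String) (runs : List (String × Int × Int)) : List Int :=
  (runs.filter (fun r => r.1 == key)).map (fun r => r.2.2)

def canonOut (R : List (String × Int × Int)) : List (List (List Int)) :=
  [[startsFor "fmt1" R, startsFor "fmt2" R, startsFor "fmt3" R,
    startsFor "fmt4" R, startsFor "fmt5" R],
   [stopsFor "fmt1" R, stopsFor "fmt2" R, (stopsFor "fmt3" R).map (· + 1000),
    (stopsFor "fmt4" R).map (· + 1000), (stopsFor "fmt5" R).map (· + 1000)]]

def astep (st : PySem.Dict String (List Int) × PySem.Dict String (List Int) × String)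
    (p : String × Int) : PySem.Dict String (List Int) × PySem.Dict String (List Int) × String :=
  let fval := PySem.Str.lower p.1
  if fval == st.2.2 then st
  else (update_dict_ent st.1 fval p.2, update_dict_ent st.2.1 st.2.2 p.2, fval)

def bstep (st : List (String × Int × Int) × String × Int) (p : String × Int) :
    List (String × Int × Int) × String × Int :=
  if p.1 != st.2.1 then (st.1 ++ [(st.2.1, st.2.2, p.2)], p.1, p.2) else st

theorem goRuns_cons (tl : Int) (cur : String) (cs : Int) (rest : List (String × Int)) :
    ∃ e t, goRuns tl cur cs rest = (cur, cs, e) :: t := by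
  induction rest generalizing cur cs with
  | nil => exact ⟨tl, [], rfl⟩
  | cons p r ih =>
      by_cases h : PySem.Str.lower p.1 == cur
      · simpa [goRuns, h] using ih cur cs
      · exact ⟨p.2, goRuns tl (PySem.Str.lower p.1) p.2 r, by simp [goRuns, h]⟩

theorem upd_getD (d : PySem.Dict String (List Int)) (k key : String) (v : Int) :
    (update_dict_ent d k v).getD key [] = d.getD key [] ++ (if k = key then [v] else []) := by
  unfold update_dict_ent
  rcases h : d.get? k with _ | out
  · by_cases hk : key = k
    · subst hk; simp [PySem.Dict.getD, h]
    · simp [PySem.Dict.getD_insert, hk, Ne.symm hk]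
  · by_cases hk : key = k
    · subst hk; simp [PySem.Dict.getD, h]
    · simp [PySem.Dict.getD_insert, hk, Ne.symm hk]

-- a fold over range(a, len xs) reading xs[k], ys[k] is a fold over the zipped tails
theorem foldl_idx_zip {σ : Type} (f : σ → String → Int → σ) (xs : List String) (ys : List Int)
    (hlen : xs.length ≤ ys.length) :
    ∀ (a : Nat) (st : σ),
      (PySem.List.pyRange (a : Int) (xs.length : Int) 1).foldl
          (fun s k => f s (PySem.List.pyGetD xs k "") (PySem.List.pyGetD ys k 0)) st
        = ((xs.drop a).zip (ys.drop a)).foldl (fun s p => f s p.1 p.2) st := by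
  suffices H : ∀ (m a : Nat) (st : σ), xs.length ≤ a + m →
      (PySem.List.pyRange (a : Int) (xs.length : Int) 1).foldl
          (fun s k => f s (PySem.List.pyGetD xs k "") (PySem.List.pyGetD ys k 0)) st
        = ((xs.drop a).zip (ys.drop a)).foldl (fun s p => f s p.1 p.2) st by
    exact fun a st => H xs.length a st (by omega)
  intro m
  induction m with
  | zero =>
      intro a st h
      rw [PySem.List.pyRange_one_eq_nil (by exact_mod_cast (by omega : xs.length ≤ a)),
        List.drop_eq_nil_of_le (by omega)]
      simp
  | succ m ih =>
      intro a st h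
      by_cases ha : xs.length ≤ a
      · rw [PySem.List.pyRange_one_eq_nil (by exact_mod_cast ha), List.drop_eq_nil_of_le ha]
        simp
      · have ha' : a < xs.length := by omega
        have hay : a < ys.length := lt_of_lt_of_le ha' hlen
        rw [PySem.List.pyRange_one_cons (by exact_mod_cast ha'), List.foldl_cons,
          List.drop_eq_getElem_cons ha', List.drop_eq_getElem_cons hay, List.zip_cons_cons,
          List.foldl_cons]
        have e1 : PySem.List.pyGetD xs (a : Int) "" = xs[a] := by
          rw [PySem.List.pyGetD_natCast, List.getD_eq_getElem _ _ ha']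
        have e2 : PySem.List.pyGetD ys (a : Int) 0 = ys[a] := by
          rw [PySem.List.pyGetD_natCast, List.getD_eq_getElem _ _ hay]
        rw [e1, e2]
        have := ih (a + 1) (f st xs[a] ys[a]) (by omega)
        simpa using this

-- loop invariant of A's dict-filling pass, with the closing stop-update folded in
theorem a_loop (tl : Int) (rest : List (String × Int)) :
    ∀ (s1 s2 : PySem.Dict String (List Int)) (cur : String) (cs : Int) (key : String),
      (rest.foldl astep (s1, s2, cur)).1.getD key []
          = s1.getD key [] ++ startsFor key (goRuns tl cur cs rest).tail
        ∧ (update_dict_ent (rest.foldl astep (s1, s2, cur)).2.1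
              (rest.foldl astep (s1, s2, cur)).2.2 tl).getD key []
          = s2.getD key [] ++ stopsFor key (goRuns tl cur cs rest) := by
  induction rest with
  | nil =>
      intro s1 s2 cur cs key
      constructor
      · simp [goRuns, startsFor]
      · rw [upd_getD]
        by_cases h : cur = key <;> simp [goRuns, stopsFor, List.filter_cons, h, List.foldl_nil]
  | cons p r ih =>
      intro s1 s2 cur cs key
      by_cases h : PySem.Str.lower p.1 == cur
      · have : astep (s1, s2, cur) p = (s1, s2, cur) := by simp [astep, h]
        rw [List.foldl_cons, this]
        simpa [goRuns, h] using ih s1 s2 cur cs key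
      · have hst : astep (s1, s2, cur) p
            = (update_dict_ent s1 (PySem.Str.lower p.1) p.2,
               update_dict_ent s2 cur p.2, PySem.Str.lower p.1) := by
          simp [astep, h]
        rw [List.foldl_cons, hst]
        obtain ⟨ih1, ih2⟩ := ih (update_dict_ent s1 (PySem.Str.lower p.1) p.2)
          (update_dict_ent s2 cur p.2) (PySem.Str.lower p.1) p.2 key
        obtain ⟨e, t, he⟩ := goRuns_cons tl (PySem.Str.lower p.1) p.2 r
        constructor
        · rw [ih1, upd_getD]
          simp only [goRuns, h, List.tail_cons, he, startsFor]
          by_cases hk : PySem.Str.lower p.1 = key <;> simp [hk]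
        · rw [ih2, upd_getD]
          simp only [goRuns, h, stopsFor]
          by_cases hk : cur = key <;> simp [hk]

-- the loop's final prev is the lowered key of the last processed pair
theorem a_prev (rest : List (String × Int)) :
    ∀ (s1 s2 : PySem.Dict String (List Int)) (cur : String),
      (rest.foldl astep (s1, s2, cur)).2.2
        = (rest.map (fun p => PySem.Str.lower p.1)).getLastD cur := by
  induction rest with
  | nil => intro s1 s2 cur; rfl
  | cons p r ih =>
      intro s1 s2 cur
      rw [List.foldl_cons, List.map_cons, List.getLastD_cons]
      by_cases h : PySem.Str.lower p.1 == cur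
      · have hc : astep (s1, s2, cur) p = (s1, s2, cur) := by simp [astep, h]
        rw [hc, ih]
        have : PySem.Str.lower p.1 = cur := by simpa [beq_iff_eq] using h
        rw [this]
      · have hc : astep (s1, s2, cur) p
            = (update_dict_ent s1 (PySem.Str.lower p.1) p.2,
               update_dict_ent s2 cur p.2, PySem.Str.lower p.1) := by simp [astep, h]
        rw [hc, ih]

theorem b_loop (tl : Int) (rest : List (String × Int)) :
    ∀ (acc : List (String × Int × Int)) (cur : String) (cs : Int),
      ((rest.foldl (fun st p => bstep st (PySem.Str.lower p.1, p.2)) (acc, cur, cs)).1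
          ++ [((rest.foldl (fun st p => bstep st (PySem.Str.lower p.1, p.2)) (acc, cur, cs)).2.1,
               (rest.foldl (fun st p => bstep st (PySem.Str.lower p.1, p.2)) (acc, cur, cs)).2.2, tl)])
        = acc ++ goRuns tl cur cs rest := by
  induction rest with
  | nil => intro acc cur cs; simp [goRuns]
  | cons p r ih =>
      intro acc cur cs
      rw [List.foldl_cons]
      by_cases h : PySem.Str.lower p.1 == cur
      · have he : PySem.Str.lower p.1 = cur := eq_of_beq h
        have hc : bstep (acc, cur, cs) (PySem.Str.lower p.1, p.2) = (acc, cur, cs) := by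
          simp [bstep, he]
        rw [hc, ih]
        simp [goRuns, h]
      · have hc : bstep (acc, cur, cs) (PySem.Str.lower p.1, p.2)
            = (acc ++ [(cur, cs, p.2)], PySem.Str.lower p.1, p.2) := by
          have hne : ¬ PySem.Str.lower p.1 = cur := by simpa [beq_iff_eq] using h
          simp [bstep, hne]
        rw [hc, ih]
        simp [goRuns, h]

-- the in-place '+= 1000' index loop maps +1000 over the list
theorem bump_aux (l : List Int) :
    ∀ (m a : Nat), l.length ≤ a + m →
      (PySem.List.pyRange (a : Int) (l.length : Int) 1).foldl
          (fun (m : List Int) k => m.set k.toNat (PySem.List.pyGetD m k 0 + 1000))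
          ((l.take a).map (· + 1000) ++ l.drop a)
        = l.map (· + 1000) := by
  intro m
  induction m with
  | zero =>
      intro a h
      rw [PySem.List.pyRange_one_eq_nil (by exact_mod_cast (by omega : l.length ≤ a)),
        List.take_of_length_le (by omega), List.drop_eq_nil_of_le (by omega)]
      simp
  | succ m ih =>
      intro a h
      by_cases ha : l.length ≤ a
      · rw [PySem.List.pyRange_one_eq_nil (by exact_mod_cast ha),
          List.take_of_length_le ha, List.drop_eq_nil_of_le ha]
        simp
      · have ha' : a < l.length := by omega
        rw [PySem.List.pyRange_one_cons (by exact_mod_cast ha'), List.foldl_cons]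
        have hlen2 : ((l.take a).map (· + 1000)).length = a := by
          simp [List.length_take]; omega
        have hget : PySem.List.pyGetD ((l.take a).map (· + 1000) ++ l.drop a) (a : Int) 0 = l[a] := by
          rw [PySem.List.pyGetD_natCast,
            List.getD_eq_getElem _ _ (by simp [hlen2]; omega), List.getElem_append_right (by omega)]
          simp only [hlen2, Nat.sub_self]
          simp [List.getElem_drop]
        have hset :
            (((l.take a).map (· + 1000) ++ l.drop a).set (a : Int).toNat (l[a] + 1000))
              = ((l.take (a + 1)).map (· + 1000) ++ l.drop (a + 1)) := by
          have hnat : (a : Int).toNat = a := by omega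
          rw [hnat, List.set_append, if_neg (by omega), hlen2]
          simp only [Nat.sub_self]
          rw [List.drop_eq_getElem_cons ha']
          simp only [List.set_cons_zero]
          rw [List.take_succ, List.getElem?_eq_getElem ha']
          simp
          rw [List.take_succ, List.getElem?_map, List.getElem?_eq_getElem ha']
          simp
        rw [hget, hset]
        have := ih (a + 1) (by omega)
        simpa using this

theorem bump_eq_map (l : List Int) :
    (PySem.List.pyRange 0 (l.length : Int) 1).foldl
        (fun (m : List Int) k => m.set k.toNat (PySem.List.pyGetD m k 0 + 1000)) l
      = l.map (· + 1000) := by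
  have := bump_aux l l.length 0 (by omega)
  simpa using this

theorem init_getD (key : String) :
    ((["fmt1","fmt2","fmt3","fmt4","fmt5","fmt6","fmt7","fmt8"]).foldl
      (fun (d : PySem.Dict String (List Int) × PySem.Dict String (List Int)) fval =>
        (d.1.insert fval [], d.2.insert fval []))
      (PySem.Dict.empty, PySem.Dict.empty)).1.getD key [] = []
    ∧ ((["fmt1","fmt2","fmt3","fmt4","fmt5","fmt6","fmt7","fmt8"]).foldl
      (fun (d : PySem.Dict String (List Int) × PySem.Dict String (List Int)) fval =>
        (d.1.insert fval [], d.2.insert fval []))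
      (PySem.Dict.empty, PySem.Dict.empty)).2.getD key [] = [] := by
  simp only [List.foldl_cons, List.foldl_nil]
  constructor <;>
    · simp only [PySem.Dict.getD_insert, PySem.Dict.getD_empty]
      split_ifs <;> rfl

-- last key of the run scan = lowered last fmt entry
theorem last_key (fmt : List String) (time : List Int) (hne : fmt ≠ [])
    (hlen : fmt.length ≤ time.length) :
    (((fmt.drop 1).zip (time.drop 1)).map (fun p => PySem.Str.lower p.1)).getLastD
        (PySem.Str.lower (PySem.List.pyGetD fmt 0 ""))
      = PySem.Str.lower (PySem.List.pyGetD fmt ((fmt.length : Int) - 1) "") := by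
  have hn : 1 ≤ fmt.length := List.length_pos_iff.mpr hne
  have hcast : ((fmt.length : Int) - 1) = ((fmt.length - 1 : Nat) : Int) := by omega
  have hfst : ((fmt.drop 1).zip (time.drop 1)).map Prod.fst = fmt.drop 1 :=
    List.map_fst_zip (by simpa using Nat.sub_le_sub_right hlen 1)
  have hmap : ((fmt.drop 1).zip (time.drop 1)).map (fun p => PySem.Str.lower p.1)
      = (fmt.drop 1).map PySem.Str.lower := by
    rw [show (fun (p : String × Int) => PySem.Str.lower p.1)
        = (PySem.Str.lower ∘ Prod.fst) from rfl, ← List.map_map, hfst]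
  rw [hmap, hcast, PySem.List.pyGetD_natCast, PySem.List.pyGetD_ofNat',
    List.getD_eq_getElem fmt "" (n := fmt.length - 1) (by omega),
    List.getD_eq_getElem fmt "" (n := 0) (by omega)]
  rcases Nat.lt_or_ge 1 fmt.length with h2 | h2
  · rw [List.getLastD_eq_getLast?, List.getLast?_map, List.getLast?_eq_getElem?]
    have hidx : (fmt.drop 1)[(fmt.drop 1).length - 1]? = some fmt[fmt.length - 1] := by
      rw [List.getElem?_drop, List.length_drop]
      rw [List.getElem?_eq_getElem (by omega)]
      congr 2
      omega
    rw [hidx]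
    simp
  · have hd : fmt.drop 1 = [] := by rw [List.drop_eq_nil_iff]; omega
    rw [hd]
    simp only [List.map_nil, List.getLastD_nil]
    have h0 : fmt.length - 1 = 0 := by omega
    simp [h0]

-- assembling A's readout from the loop invariant
theorem assemble (I1 I2 : PySem.Dict String (List Int))
    (hI1 : ∀ key, I1.getD key [] = []) (hI2 : ∀ key, I2.getD key [] = [])
    (cur0 flast : String) (t0 tl : Int) (pairs : List (String × Int))
    (hflast : flast = (pairs.foldl astep (I1.insert cur0 [t0], I2, cur0)).2.2) :
    [[(pairs.foldl astep (I1.insert cur0 [t0], I2, cur0)).1.getD "fmt1" [],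
      (pairs.foldl astep (I1.insert cur0 [t0], I2, cur0)).1.getD "fmt2" [],
      (pairs.foldl astep (I1.insert cur0 [t0], I2, cur0)).1.getD "fmt3" [],
      (pairs.foldl astep (I1.insert cur0 [t0], I2, cur0)).1.getD "fmt4" [],
      (pairs.foldl astep (I1.insert cur0 [t0], I2, cur0)).1.getD "fmt5" []],
     [((["fmt3","fmt4","fmt5"]).foldl
        (fun (d : PySem.Dict String (List Int)) fval =>
          d.insert fval ((PySem.List.pyRange 0 ((d.getD fval []).length : Int) 1).foldl
            (fun (m : List Int) k => m.set k.toNat (PySem.List.pyGetD m k 0 + 1000))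
            (d.getD fval [])))
        (update_dict_ent (pairs.foldl astep (I1.insert cur0 [t0], I2, cur0)).2.1 flast tl)).getD "fmt1" [],
      ((["fmt3","fmt4","fmt5"]).foldl
        (fun (d : PySem.Dict String (List Int)) fval =>
          d.insert fval ((PySem.List.pyRange 0 ((d.getD fval []).length : Int) 1).foldl
            (fun (m : List Int) k => m.set k.toNat (PySem.List.pyGetD m k 0 + 1000))
            (d.getD fval [])))
        (update_dict_ent (pairs.foldl astep (I1.insert cur0 [t0], I2, cur0)).2.1 flast tl)).getD "fmt2" [],
      ((["fmt3","fmt4","fmt5"]).foldl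
        (fun (d : PySem.Dict String (List Int)) fval =>
          d.insert fval ((PySem.List.pyRange 0 ((d.getD fval []).length : Int) 1).foldl
            (fun (m : List Int) k => m.set k.toNat (PySem.List.pyGetD m k 0 + 1000))
            (d.getD fval [])))
        (update_dict_ent (pairs.foldl astep (I1.insert cur0 [t0], I2, cur0)).2.1 flast tl)).getD "fmt3" [],
      ((["fmt3","fmt4","fmt5"]).foldl
        (fun (d : PySem.Dict String (List Int)) fval =>
          d.insert fval ((PySem.List.pyRange 0 ((d.getD fval []).length : Int) 1).foldl
            (fun (m : List Int) k => m.set k.toNat (PySem.List.pyGetD m k 0 + 1000))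
            (d.getD fval [])))
        (update_dict_ent (pairs.foldl astep (I1.insert cur0 [t0], I2, cur0)).2.1 flast tl)).getD "fmt4" [],
      ((["fmt3","fmt4","fmt5"]).foldl
        (fun (d : PySem.Dict String (List Int)) fval =>
          d.insert fval ((PySem.List.pyRange 0 ((d.getD fval []).length : Int) 1).foldl
            (fun (m : List Int) k => m.set k.toNat (PySem.List.pyGetD m k 0 + 1000))
            (d.getD fval [])))
        (update_dict_ent (pairs.foldl astep (I1.insert cur0 [t0], I2, cur0)).2.1 flast tl)).getD "fmt5" []]]
    = canonOut (goRuns tl cur0 t0 pairs) := by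
  have hstart : ∀ key, (pairs.foldl astep (I1.insert cur0 [t0], I2, cur0)).1.getD key []
      = startsFor key (goRuns tl cur0 t0 pairs) := by
    intro key
    rw [(a_loop tl pairs (I1.insert cur0 [t0]) I2 cur0 t0 key).1,
      PySem.Dict.getD_insert, hI1]
    obtain ⟨e, t, he⟩ := goRuns_cons tl cur0 t0 pairs
    rw [he]
    by_cases hk : key = cur0
    · subst hk; simp [startsFor, List.filter_cons]
    · have hk' : ¬ cur0 = key := fun hc => hk hc.symm
      simp [startsFor, List.filter_cons, hk, hk']
  have hstop : ∀ key, (update_dict_ent (pairs.foldl astep (I1.insert cur0 [t0], I2, cur0)).2.1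
        flast tl).getD key [] = stopsFor key (goRuns tl cur0 t0 pairs) := by
    intro key
    rw [hflast, (a_loop tl pairs (I1.insert cur0 [t0]) I2 cur0 t0 key).2, hI2]
    simp
  simp only [List.foldl_cons, List.foldl_nil, bump_eq_map, PySem.Dict.getD_insert, hstop]
  simp [canonOut, hstart, hstop]

-- A computes the canonical readout of the run decomposition
theorem a_eq (start stop : Int) (fmt : List String) (time : List Int) (hne : fmt ≠ [])
    (hlen : fmt.length ≤ time.length) :
    find_fmt_region start stop fmt time
      = canonOut (goRuns (PySem.List.pyGetD time ((fmt.length : Int) - 1) 0)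
          (PySem.Str.lower (PySem.List.pyGetD fmt 0 "")) (PySem.List.pyGetD time 0 0)
          ((fmt.drop 1).zip (time.drop 1))) := by
  have hfold : ∀ (st0 : PySem.Dict String (List Int) × PySem.Dict String (List Int) × String),
      (PySem.List.pyRange 1 (fmt.length : Int) 1).foldl
        (fun (st : PySem.Dict String (List Int) × PySem.Dict String (List Int) × String) k =>
          let fval := PySem.Str.lower (PySem.List.pyGetD fmt k "")
          if fval == st.2.2 then st
          else
            let s_stop2 := update_dict_ent st.2.1 st.2.2 (PySem.List.pyGetD time k 0)
            let s_start2 := update_dict_ent st.1 fval (PySem.List.pyGetD time k 0)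
            (s_start2, s_stop2, fval)) st0
      = ((fmt.drop 1).zip (time.drop 1)).foldl astep st0 := by
    intro st0
    have h := foldl_idx_zip (fun s fv t => astep s (fv, t)) fmt time hlen 1 st0
    simp only [Nat.cast_one] at h
    exact h
  have hlast : PySem.Str.lower (PySem.List.pyGetD fmt ((fmt.length : Int) - 1) "")
      = (((fmt.drop 1).zip (time.drop 1)).foldl astep
          (((["fmt1","fmt2","fmt3","fmt4","fmt5","fmt6","fmt7","fmt8"]).foldl
            (fun (d : PySem.Dict String (List Int) × PySem.Dict String (List Int)) fval =>
              (d.1.insert fval [], d.2.insert fval []))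
            (PySem.Dict.empty, PySem.Dict.empty)).1.insert
              (PySem.Str.lower (PySem.List.pyGetD fmt 0 "")) [PySem.List.pyGetD time 0 0],
           ((["fmt1","fmt2","fmt3","fmt4","fmt5","fmt6","fmt7","fmt8"]).foldl
            (fun (d : PySem.Dict String (List Int) × PySem.Dict String (List Int)) fval =>
              (d.1.insert fval [], d.2.insert fval []))
            (PySem.Dict.empty, PySem.Dict.empty)).2,
           PySem.Str.lower (PySem.List.pyGetD fmt 0 ""))).2.2 := by
    rw [a_prev]
    exact (last_key fmt time hne hlen).symm
  unfold find_fmt_region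
  simp only [hfold, hlast]
  exact assemble _ _ (fun key => (init_getD key).1) (fun key => (init_getD key).2)
    _ _ _ _ _ rfl

-- B computes the same canonical readout
theorem b_eq (start stop : Int) (fmt : List String) (time : List Int) (hne : fmt ≠ [])
    (hlen : fmt.length ≤ time.length) :
    find_fmt_region_alt start stop fmt time
      = canonOut (goRuns (PySem.List.pyGetD time ((fmt.length : Int) - 1) 0)
          (PySem.Str.lower (PySem.List.pyGetD fmt 0 "")) (PySem.List.pyGetD time 0 0)
          ((fmt.drop 1).zip (time.drop 1))) := by
  have hsl1 : PySem.List.slice (fmt.map PySem.Str.lower) (some 1) none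
      = (fmt.drop 1).map PySem.Str.lower := by
    have := PySem.List.slice_from (fmt.map PySem.Str.lower) (by norm_num : (0:Int) ≤ 1)
    simpa [← List.map_drop] using this
  have hsl2 : PySem.List.slice time (some 1) none = time.drop 1 := by
    have := PySem.List.slice_from time (by norm_num : (0:Int) ≤ 1)
    simpa using this
  have hcur : PySem.List.pyGetD (fmt.map PySem.Str.lower) 0 ""
      = PySem.Str.lower (PySem.List.pyGetD fmt 0 "") :=
    PySem.List.pyGetD_map PySem.Str.lower fmt 0 ""
  unfold find_fmt_region_alt
  simp only [List.length_map, hsl1, hsl2, hcur, List.zip_map_left, List.foldl_map,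
    Prod.map_fst, Prod.map_snd, id_eq]
  have h := b_loop (PySem.List.pyGetD time ((fmt.length : Int) - 1) 0)
    ((fmt.drop 1).zip (time.drop 1)) [] (PySem.Str.lower (PySem.List.pyGetD fmt 0 ""))
    (PySem.List.pyGetD time 0 0)
  simp only [bstep, List.nil_append] at h
  rw [h]
  simp [canonOut, startsFor, stopsFor, List.map_map, Function.comp]

-- ===== VERDICT (by name: the statement is the Claim_ definition above) =====
theorem find_fmt_region_spec : Claim_equal_find_fmt_region := by
  intro start stop fmt time _ hpre
  obtain ⟨hne, hlen⟩ := hpre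
  unfold Spec_find_fmt_region
  rw [a_eq start stop fmt time hne hlen, b_eq start stop fmt time hne hlen]
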